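-- pv_equiv track=rewrite | github.com/Bibster69/BioInf | DNA_helper_functions.py | get_protein_from_frame
-- ===== SOURCE A (Python) =====
-- def get_protein_from_frame(frame):
--     found_protein = []
--     all_found_proteins = []
--     for aminoacid in frame:
--         if aminoacid == '_':
--             if found_protein:
--                 for x in found_protein:
--                     all_found_proteins.append(x)
--                 found_protein = []
--         else:
--             if aminoacid == 'M':
--                 found_protein.append("") # żeby for zadzałał
--             for i in range(len(found_protein)): # jeśli nie znalazł M to nic nie dodaje
--                 found_protein[i] += aminoacid
--     return all_found_proteins
-- ===== SOURCE B (Python) =====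
-- def get_protein_from_frame(frame):
--     starts = []   # indices of 'M' opening still-active proteins
--     out = []
--     for i, c in enumerate(frame):
--         if c == '_':
--             out.extend(frame[m:i] for m in starts)
--             starts = []
--         elif c == 'M':
--             starts.append(i)
--     return out
-- ===== Notes on version B (the rewrite author's own statement) =====
-- stated objective: faster
-- what changed: Instead of keeping one growing string per active protein and appending every amino acid to all of them (repeated string concatenation across many active proteins), B only records the start index of each methionine and, at each stop symbol, emits the corresponding frame slices directly.
import Mathlib
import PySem

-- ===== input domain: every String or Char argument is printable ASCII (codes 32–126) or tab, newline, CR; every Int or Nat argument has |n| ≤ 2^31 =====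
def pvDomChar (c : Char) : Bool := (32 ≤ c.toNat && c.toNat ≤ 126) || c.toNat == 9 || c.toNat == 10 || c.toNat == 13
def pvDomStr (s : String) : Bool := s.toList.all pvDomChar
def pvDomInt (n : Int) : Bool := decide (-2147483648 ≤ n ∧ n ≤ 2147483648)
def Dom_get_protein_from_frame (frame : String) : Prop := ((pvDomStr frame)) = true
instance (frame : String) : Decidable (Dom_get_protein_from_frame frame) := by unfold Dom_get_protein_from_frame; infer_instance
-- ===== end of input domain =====

-- B replaces A's per-character append to every active protein string by recording the
-- 'M' start indices and emitting slices frame[m:i] at each stop '_' (objective: faster).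

-- ===== PORT A =====
-- state: (found_protein, all_found_proteins), proteins as List Char
def pvStepA (s : List (List Char) × List (List Char)) (c : Char) :
    List (List Char) × List (List Char) :=
  if c = '_' then
    if s.1 ≠ [] then ([], s.2 ++ s.1) else s
  else
    let f := if c = 'M' then s.1 ++ [([] : List Char)] else s.1
    (f.map (fun p => p ++ [c]), s.2)

def get_protein_from_frame (frame : String) : List String :=
  ((frame.toList.foldl pvStepA ([], [])).2).map String.mk

-- ===== PORT B =====
-- state: (starts, out); frame[m:i] with 0 ≤ m ≤ i is PySem.List.slice on the code points (exact)
def pvStepB (cs : List Char) (s : List Int × List (List Char)) (ic : Int × Char) :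
    List Int × List (List Char) :=
  if ic.2 = '_' then
    ([], s.2 ++ s.1.map (fun m => PySem.List.slice cs (some m) (some ic.1)))
  else if ic.2 = 'M' then (s.1 ++ [ic.1], s.2)
  else s

def get_protein_from_frame_alt (frame : String) : List String :=
  (((PySem.List.enumerate frame.toList 0).foldl (pvStepB frame.toList) ([], [])).2).map String.mk

-- ===== PRECONDITION & SPEC =====
def Spec_get_protein_from_frame (frame : String) (out : List String) : Prop := out = get_protein_from_frame_alt frame
instance (frame : String) (out : List String) : Decidable (Spec_get_protein_from_frame frame out) := by unfold Spec_get_protein_from_frame; infer_instance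

-- ===== CLAIM (what is proved, stated in full; the proofs are below) =====
def Claim_equal_get_protein_from_frame : Prop := ∀ (frame : String), Dom_get_protein_from_frame frame → Spec_get_protein_from_frame frame (get_protein_from_frame frame)

-- ===== LEMMAS AND PROOFS =====

lemma pvStepA_stop_ne (s : List (List Char) × List (List Char)) (h : s.1 ≠ []) :
    pvStepA s '_' = ([], s.2 ++ s.1) := by simp [pvStepA, h]

lemma pvStepA_stop_nil (s : List (List Char) × List (List Char)) (h : s.1 = []) :
    pvStepA s '_' = s := by simp [pvStepA, h]

lemma pvStepA_M (s : List (List Char) × List (List Char)) :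
    pvStepA s 'M' = ((s.1 ++ [[]]).map (fun p => p ++ ['M']), s.2) := by
  simp [pvStepA]

lemma pvStepA_other (s : List (List Char) × List (List Char)) (c : Char)
    (h1 : c ≠ '_') (h2 : c ≠ 'M') :
    pvStepA s c = (s.1.map (fun p => p ++ [c]), s.2) := by simp [pvStepA, h1, h2]

lemma pvStepB_stop (cs : List Char) (s : List Int × List (List Char)) (i : Int) :
    pvStepB cs s (i, '_') = ([], s.2 ++ s.1.map (fun m => PySem.List.slice cs (some m) (some i))) := by
  simp [pvStepB]

lemma pvStepB_M (cs : List Char) (s : List Int × List (List Char)) (i : Int) :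
    pvStepB cs s (i, 'M') = (s.1 ++ [i], s.2) := by simp [pvStepB]

lemma pvStepB_other (cs : List Char) (s : List Int × List (List Char)) (i : Int) (c : Char)
    (h1 : c ≠ '_') (h2 : c ≠ 'M') : pvStepB cs s (i, c) = s := by simp [pvStepB, h1, h2]

-- appending the character at index i extends the slice [m, i) to [m, i+1)
lemma pvTakeSucc (cs : List Char) (m i : Nat) (c : Char) (l : List Char)
    (hm : m ≤ i) (h : cs.drop i = c :: l) :
    (cs.drop m).take (i - m) ++ [c] = (cs.drop m).take (i + 1 - m) := by
  have h3 : cs[i]? = some c := by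
    rw [show i = i + 0 by omega, ← List.getElem?_drop, h]; rfl
  have hget : (cs.drop m)[i - m]? = some c := by
    rw [List.getElem?_drop, show m + (i - m) = i by omega, h3]
  rw [show i + 1 - m = (i - m) + 1 by omega, List.take_add_one, hget]
  rfl

-- main invariant: A's active proteins are exactly the slices [m, i) for the recorded starts
lemma pvMain (cs : List Char) : ∀ (l : List Char) (i : Nat) (starts : List Nat) (acc : List (List Char)),
    cs.drop i = l →
    (∀ m ∈ starts, m ≤ i) →
    (l.foldl pvStepA (starts.map (fun m => (cs.drop m).take (i - m)), acc)).2
      = ((PySem.List.enumerate l (i : Int)).foldl (pvStepB cs) (starts.map (fun (m : Nat) => (m : Int)), acc)).2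
  := by
  intro l
  induction l with
  | nil => intro i starts acc _ _; simp [PySem.List.enumerate]
  | cons c l' ih =>
    intro i starts acc hdrop hb
    have hdrop' : cs.drop (i + 1) = l' := by
      have h1 : (cs.drop i).drop 1 = l' := by rw [hdrop]; rfl
      rw [List.drop_drop] at h1
      simpa [Nat.add_comm] using h1
    rw [PySem.List.enumerate_cons, List.foldl_cons, List.foldl_cons]
    have hsl : (starts.map (fun (m : Nat) => (m : Int))).map
        (fun m => PySem.List.slice cs (some m) (some (i : Int)))
        = starts.map (fun m => (cs.drop m).take (i - m)) := by
      rw [List.map_map]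
      apply List.map_congr_left
      intro m _
      simp [PySem.List.slice_natCast]
    by_cases hc : c = '_'
    · subst hc
      rw [pvStepB_stop, hsl]
      by_cases hs : starts = []
      · subst hs
        rw [pvStepA_stop_nil _ (by simp)]
        have := ih (i + 1) [] acc hdrop' (by simp)
        simpa using this
      · rw [pvStepA_stop_ne _ (by simpa using hs)]
        have := ih (i + 1) [] (acc ++ starts.map (fun m => (cs.drop m).take (i - m))) hdrop' (by simp)
        simpa using this
    · have hstep : ∀ (ss : List Nat), (∀ m ∈ ss, m ≤ i) →
          (ss.map (fun m => (cs.drop m).take (i - m))).map (fun p => p ++ [c])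
            = ss.map (fun m => (cs.drop m).take (i + 1 - m)) := by
        intro ss hss
        rw [List.map_map]
        apply List.map_congr_left
        intro m hm
        exact pvTakeSucc cs m i c l' (hss m hm) hdrop
      by_cases hM : c = 'M'
      · subst hM
        rw [pvStepA_M, pvStepB_M]
        have hA : ((starts.map (fun m => (cs.drop m).take (i - m))) ++ [([] : List Char)]).map
            (fun p => p ++ ['M'])
            = (starts ++ [i]).map (fun m => (cs.drop m).take (i + 1 - m)) := by
          rw [List.map_append, List.map_append, hstep starts hb]
          congr 1
          simp only [List.map_cons, List.map_nil, List.nil_append]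
          rw [show (cs.drop i).take (i + 1 - i) = ['M'] by
            rw [show i + 1 - i = 1 by omega, hdrop]; rfl]
        rw [hA]
        have := ih (i + 1) (starts ++ [i]) acc hdrop'
          (by intro m hm
              rcases List.mem_append.mp hm with h | h
              · exact Nat.le_succ_of_le (hb m h)
              · simp at h; omega)
        push_cast at this ⊢
        rw [this]
        simp
      · rw [pvStepA_other _ c hc hM, pvStepB_other cs _ _ c hc hM]
        rw [hstep starts hb]
        have := ih (i + 1) starts acc hdrop'
          (fun m hm => Nat.le_succ_of_le (hb m hm))
        push_cast at this ⊢
        exact this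

-- ===== VERDICT (by name: the statement is the Claim_ definition above) =====
theorem get_protein_from_frame_spec : Claim_equal_get_protein_from_frame := by
  intro frame _
  unfold Spec_get_protein_from_frame get_protein_from_frame get_protein_from_frame_alt
  have := pvMain frame.toList frame.toList 0 [] [] (by simp) (by simp)
  simp only [List.map_nil] at this
  rw [this]
  rfl
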